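-- pv_equiv track=rewrite | github.com/CederGroupHub/alabos | alab_management/alarm.py | format_message_to_codeblock
-- ===== SOURCE A (Python) =====
-- def format_message_to_codeblock(message: str) -> str:
--     """
--     The function takes a message and formats it as a code block.
--     It is used to format tracebacks as code blocks in Slack.
--
--     Args:
--         message: The message to format (String). This is usually a traceback.
--
--     Returns ------- formatted_message: The formatted message. This will be formatted into code block in slack if the
--     message contains traceback, otherwise it will be the original message.
--     """
--     # Check if "Traceback (most recent call last):" is in the message
--     # Split the message into lines
--     lines = message.split("\n")
--
--     # Find the index of the line that starts with "Traceback (most recent call last):"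
--     traceback_index = next(
--         (
--             i
--             for i, line in enumerate(lines)
--             if "Traceback (most recent call last):" in line
--         ),
--         None,
--     )
--
--     if traceback_index is not None:
--         # Extract the traceback and the lines that follow it
--         traceback_lines = lines[traceback_index:]
--
--         # Join the traceback lines into a single string
--         traceback_str = "\n".join(traceback_lines)
--
--         # Format the traceback as a code block
--         traceback_code = f"```{traceback_str}\n```"
--
--         # Replace the original traceback lines with the formatted code block
--         lines[traceback_index:] = [traceback_code]
--
--         # Join the lines back into a single string
--         formatted_message = "\n".join(lines)
--
--     else:
--         formatted_message = message
--     return formatted_message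
-- ===== SOURCE B (Python) =====
-- MARKER = "Traceback (most recent call last):"
--
-- def format_message_to_codeblock(message: str) -> str:
--     idx = message.find(MARKER)
--     if idx == -1:
--         return message
--     line_start = message.rfind("\n", 0, idx) + 1
--     return message[:line_start] + "```" + message[line_start:] + "\n```"
-- ===== Notes on version B (the rewrite author's own statement) =====
-- stated objective: simpler
-- what changed: A splits the message into a list of lines, scans them with enumerate/next for the marker line, splices a code-block element into the list and rejoins; B never builds a line list: it locates the marker with str.find, finds the start of its line with str.rfind('\n', 0, idx), and assembles the result from two string slices.
import Mathlib
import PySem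

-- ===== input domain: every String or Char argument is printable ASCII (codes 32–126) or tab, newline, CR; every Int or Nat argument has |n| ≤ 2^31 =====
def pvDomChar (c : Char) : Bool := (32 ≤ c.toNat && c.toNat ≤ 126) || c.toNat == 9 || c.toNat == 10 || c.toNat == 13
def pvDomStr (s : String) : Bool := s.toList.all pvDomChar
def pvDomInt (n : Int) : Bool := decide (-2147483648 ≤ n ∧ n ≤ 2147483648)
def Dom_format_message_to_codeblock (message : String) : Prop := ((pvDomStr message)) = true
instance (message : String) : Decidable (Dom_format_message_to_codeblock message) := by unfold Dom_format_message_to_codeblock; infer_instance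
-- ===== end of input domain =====

-- B replaces A's split-into-lines / scan-lines / rejoin pipeline by direct index arithmetic on the
-- string (find the marker, rfind the preceding newline, two slices); objective: simpler, same cost.

-- ===== PORT A =====
def pvMarkerA : List Char := "Traceback (most recent call last):".toList

-- next((i for i, line in enumerate(lines) if marker in line), None)
def pvFirstIdx : List (List Char) → Option Nat
  | [] => none
  | l :: ls => if PySem.Chars.isIn pvMarkerA l then some 0 else (pvFirstIdx ls).map (· + 1)

-- A's body on the code points (message.split("\n"), the enumerate/next search, slice-assign, "\n".join)
def pvAGo (cs : List Char) : List Char :=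
  let lines := PySem.Chars.splitOn cs ['\n']
  match pvFirstIdx lines with
  | none => cs
  | some i =>
    let traceback_str := PySem.Chars.join ['\n'] (lines.drop i)
    let traceback_code := "```".toList ++ traceback_str ++ "\n```".toList
    PySem.Chars.join ['\n'] (lines.take i ++ [traceback_code])

def format_message_to_codeblock (message : String) : String :=
  String.ofList (pvAGo message.toList)

-- ===== PORT B =====
def pvMarkerB : List Char := "Traceback (most recent call last):".toList

-- B's body on the code points (message.find, message.rfind("\n", 0, idx), two slices)
def pvBGo (cs : List Char) : List Char :=
  let idx := PySem.Chars.find cs pvMarkerB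
  if idx = -1 then cs
  else
    let lineStart := PySem.Chars.rfindFrom cs ['\n'] 0 (some idx) + 1
    PySem.Chars.slice cs none (some lineStart) ++ "```".toList
      ++ PySem.Chars.slice cs (some lineStart) none ++ "\n```".toList

def format_message_to_codeblock_alt (message : String) : String :=
  String.ofList (pvBGo message.toList)

-- ===== PRECONDITION & SPEC =====
def Spec_format_message_to_codeblock (message : String) (out : String) : Prop := out = format_message_to_codeblock_alt message
instance (message : String) (out : String) : Decidable (Spec_format_message_to_codeblock message out) := by unfold Spec_format_message_to_codeblock; infer_instance

-- ===== CLAIM (what is proved, stated in full; the proofs are below) =====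
def Claim_equal_format_message_to_codeblock : Prop := ∀ (message : String), Dom_format_message_to_codeblock message → Spec_format_message_to_codeblock message (format_message_to_codeblock message)

-- ===== LEMMAS AND PROOFS =====

lemma pv_marker_eq : pvMarkerB = pvMarkerA := rfl

lemma pv_nl_not_mem_marker : '\n' ∉ pvMarkerA := by decide

-- ---- splitOn characterization ----

lemma pv_go_no_sep : ∀ (cs : List Char) (fuel : Nat) (cur : List Char) (acc : List (List Char)),
    cs.length < fuel → '\n' ∉ cs →
    PySem.Chars.splitOn.go ['\n'] fuel cs cur acc = acc.reverse ++ [cur.reverse ++ cs] := by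
  intro cs
  induction cs with
  | nil =>
    intro fuel cur acc hf _
    match fuel, hf with
    | fuel + 1, _ => simp [PySem.Chars.splitOn.go]
  | cons c rest ih =>
    intro fuel cur acc hf hmem
    match fuel, hf with
    | fuel + 1, hf =>
      have hc : c ≠ '\n' := fun h => hmem (h ▸ List.mem_cons_self)
      have hpre : (['\n'] : List Char).isPrefixOf (c :: rest) = false := by
        simp [List.isPrefixOf]
        exact fun h => (hc h.symm).elim
      simp only [PySem.Chars.splitOn.go, hpre, Bool.false_eq_true, if_false]
      rw [ih fuel (c :: cur) acc (by simpa using Nat.lt_of_succ_lt_succ hf)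
        (fun h => hmem (List.mem_cons_of_mem _ h))]
      simp

lemma pv_go_acc : ∀ (fuel : Nat) (cs : List Char) (cur : List Char) (acc : List (List Char)),
    PySem.Chars.splitOn.go ['\n'] fuel cs cur acc
      = acc.reverse ++ PySem.Chars.splitOn.go ['\n'] fuel cs cur [] := by
  intro fuel
  induction fuel with
  | zero => intro cs cur acc; simp [PySem.Chars.splitOn.go]
  | succ fuel ih =>
    intro cs cur acc
    cases cs with
    | nil => simp [PySem.Chars.splitOn.go]
    | cons c rest =>
      by_cases hpre : (['\n'] : List Char).isPrefixOf (c :: rest) = true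
      · simp only [PySem.Chars.splitOn.go, hpre, if_true]
        rw [ih _ [] (cur.reverse :: acc), ih _ [] [cur.reverse]]
        simp
      · simp only [PySem.Chars.splitOn.go, hpre, Bool.false_eq_true, if_false]
        rw [ih rest (c :: cur) acc]

lemma pv_go_sep : ∀ (l : List Char) (rest : List Char) (fuel : Nat) (cur : List Char)
    (acc : List (List Char)), l.length + 1 + rest.length < fuel → '\n' ∉ l →
    PySem.Chars.splitOn.go ['\n'] fuel (l ++ '\n' :: rest) cur acc
      = PySem.Chars.splitOn.go ['\n'] (fuel - (l.length + 1)) rest [] ((cur.reverse ++ l) :: acc) := by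
  intro l
  induction l with
  | nil =>
    intro rest fuel cur acc hf _
    match fuel, hf with
    | fuel + 1, _ =>
      have hpre : (['\n'] : List Char).isPrefixOf ('\n' :: rest) = true := by
        simp [List.isPrefixOf]
      simp only [List.nil_append, PySem.Chars.splitOn.go, hpre, if_true]
      simp
  | cons c l' ih =>
    intro rest fuel cur acc hf hmem
    match fuel, hf with
    | fuel + 1, hf =>
      have hc : c ≠ '\n' := fun h => hmem (h ▸ List.mem_cons_self)
      have hpre : (['\n'] : List Char).isPrefixOf (c :: (l' ++ '\n' :: rest)) = false := by
        simp [List.isPrefixOf]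
        exact fun h => (hc h.symm).elim
      simp only [List.cons_append, PySem.Chars.splitOn.go, hpre, Bool.false_eq_true, if_false]
      rw [ih rest fuel (c :: cur) acc (by simp at hf ⊢; omega)
        (fun h => hmem (List.mem_cons_of_mem _ h))]
      have harith : fuel - (l'.length + 1) = fuel + 1 - ((c :: l').length + 1) := by
        simp
      rw [harith]
      simp

lemma pv_splitOn_no_sep (cs : List Char) (h : '\n' ∉ cs) :
    PySem.Chars.splitOn cs ['\n'] = [cs] := by
  unfold PySem.Chars.splitOn
  rw [pv_go_no_sep cs (cs.length + 1) [] [] (Nat.lt_succ_self _) h]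
  simp

lemma pv_splitOn_cons (l rest : List Char) (hl : '\n' ∉ l) :
    PySem.Chars.splitOn (l ++ '\n' :: rest) ['\n'] = l :: PySem.Chars.splitOn rest ['\n'] := by
  unfold PySem.Chars.splitOn
  rw [pv_go_sep l rest _ [] [] (by simp; omega) hl]
  have harith : (l ++ '\n' :: rest).length + 1 - (l.length + 1) = rest.length + 1 := by
    simp
  rw [harith]
  simp only [List.reverse_nil, List.nil_append]
  rw [pv_go_acc (rest.length + 1) rest [] [l]]
  simp

-- head of dropWhile (· != '\n') is '\n'
lemma pv_dropWhile_head : ∀ (xs : List Char) (c : Char) (tl : List Char),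
    xs.dropWhile (fun c => c != '\n') = c :: tl → c = '\n' := by
  intro xs
  induction xs with
  | nil => intro c tl h; simp [List.dropWhile] at h
  | cons a as ih =>
    intro c tl h
    by_cases ha : a = '\n'
    · rw [List.dropWhile_cons_of_neg (by simp [ha])] at h
      rw [← ha]
      exact (List.cons.injEq _ _ _ _ ▸ h).1.symm
    · rw [List.dropWhile_cons_of_pos (by simp [ha])] at h
      exact ih c tl h

-- first-newline decomposition
lemma pv_decomp (cs : List Char) (h : '\n' ∈ cs) :
    ∃ l rest, cs = l ++ '\n' :: rest ∧ '\n' ∉ l := by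
  have hd : cs.dropWhile (fun c => c != '\n') ≠ [] := by
    intro h0
    have heq := List.takeWhile_append_dropWhile (p := fun c => c != '\n') (l := cs)
    rw [h0, List.append_nil] at heq
    have hmem : '\n' ∈ cs.takeWhile (fun c => c != '\n') := by rw [heq]; exact h
    have := List.mem_takeWhile_imp hmem
    simp at this
  obtain ⟨c, tl, hct⟩ : ∃ c tl, cs.dropWhile (fun c => c != '\n') = c :: tl := by
    cases hdw : cs.dropWhile (fun c => c != '\n') with
    | nil => exact absurd hdw hd
    | cons c tl => exact ⟨c, tl, rfl⟩
  have hc : c = '\n' := pv_dropWhile_head cs c tl hct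
  refine ⟨cs.takeWhile (fun c => c != '\n'), tl, ?_, ?_⟩
  · conv_lhs => rw [← List.takeWhile_append_dropWhile (p := fun c => c != '\n') (l := cs)]
    rw [hct, hc]
  · intro hmem
    have := List.mem_takeWhile_imp hmem
    simp at this

lemma pv_splitOn_ne_nil (cs : List Char) : PySem.Chars.splitOn cs ['\n'] ≠ [] := by
  by_cases h : '\n' ∈ cs
  · obtain ⟨l, rest, rfl, hl⟩ := pv_decomp cs h
    rw [pv_splitOn_cons l rest hl]
    simp
  · rw [pv_splitOn_no_sep cs h]
    simp

lemma pv_join_cons (sep a : List Char) (xs : List (List Char)) (h : xs ≠ []) :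
    PySem.Chars.join sep (a :: xs) = a ++ sep ++ PySem.Chars.join sep xs := by
  cases xs with
  | nil => exact absurd rfl h
  | cons b t => exact PySem.Chars.join_cons_cons sep a b t

lemma pv_join_splitOn : ∀ (n : Nat) (cs : List Char), cs.length ≤ n →
    PySem.Chars.join ['\n'] (PySem.Chars.splitOn cs ['\n']) = cs := by
  intro n
  induction n with
  | zero =>
    intro cs hle
    have hcs : cs = [] := by cases cs with | nil => rfl | cons a t => simp at hle
    subst hcs
    rw [pv_splitOn_no_sep _ (by simp), PySem.Chars.join_singleton]
  | succ n ih =>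
    intro cs hle
    by_cases h : '\n' ∈ cs
    · obtain ⟨l, rest, rfl, hl⟩ := pv_decomp cs h
      rw [pv_splitOn_cons l rest hl, pv_join_cons _ _ _ (pv_splitOn_ne_nil rest),
        ih rest (by simp at hle; omega)]
      simp
    · rw [pv_splitOn_no_sep cs h, PySem.Chars.join_singleton]

-- ---- prefix / infix helpers ----

lemma pv_prefix_through_sep {M u v : List Char} (hM : '\n' ∉ M) (h : M <+: u ++ '\n' :: v) :
    M <+: u := by
  by_cases hlen : M.length ≤ u.length
  · rw [List.prefix_iff_eq_take] at h
    rw [List.take_append, (show M.length - u.length = 0 by omega), List.take_zero,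
      List.append_nil] at h
    exact h ▸ List.take_prefix _ u
  · exfalso
    obtain ⟨t, ht⟩ := h
    have hu : u.length < M.length := Nat.lt_of_not_le hlen
    have e1 : (M ++ t)[u.length]? = M[u.length]? := List.getElem?_append_left hu
    have e2 : (u ++ '\n' :: v)[u.length]? = some '\n' := by
      rw [List.getElem?_append_right (le_refl _)]
      simp
    have hM' : M[u.length]? = some '\n' := by rw [← e1, ht, e2]
    exact hM (List.mem_of_getElem? hM')

lemma pv_infix_iff_drop (sub s : List Char) : sub <:+: s ↔ ∃ j, sub <+: s.drop j := by
  rw [← PySem.Chars.isIn_iff_infix, ← PySem.Chars.exists_prefix_drop_iff_isIn]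

lemma pv_infix_split {M l rest : List Char} (hM : '\n' ∉ M)
    (h : M <:+: l ++ '\n' :: rest) : M <:+: l ∨ M <:+: rest := by
  rw [pv_infix_iff_drop] at h
  obtain ⟨j, hj⟩ := h
  by_cases hjl : j ≤ l.length
  · left
    rw [pv_infix_iff_drop]
    refine ⟨j, ?_⟩
    rw [List.drop_append, (show j - l.length = 0 by omega), List.drop_zero] at hj
    exact pv_prefix_through_sep hM hj
  · right
    rw [pv_infix_iff_drop]
    refine ⟨j - l.length - 1, ?_⟩
    rw [List.drop_append, List.drop_eq_nil_of_le (by omega), List.nil_append,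
      (show j - l.length = (j - l.length - 1) + 1 by omega), List.drop_succ_cons] at hj
    exact hj

-- ---- find characterization ----

lemma pv_find_eq {s sub : List Char} {k : Nat} (hk : sub <+: s.drop k)
    (hmin : ∀ i < k, ¬ sub <+: s.drop i) : PySem.Chars.find s sub = k := by
  have h0 : 0 ≤ PySem.Chars.find s sub :=
    (PySem.Chars.find_nonneg_iff _ _).2 ((pv_infix_iff_drop _ _).2 ⟨k, hk⟩)
  obtain ⟨h1, h2⟩ := PySem.Chars.find_spec h0
  rcases Nat.lt_trichotomy (PySem.Chars.find s sub).toNat k with h | h | h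
  · exact absurd h1 (hmin _ h)
  · omega
  · exact absurd hk (h2 k h)

-- ---- take/drop shifts ----

lemma pv_take_shift (l t : List Char) (k : Nat) :
    (l ++ '\n' :: t).take (l.length + 1 + k) = l ++ '\n' :: t.take k := by
  rw [List.take_append, List.take_of_length_le (by omega),
    (show l.length + 1 + k - l.length = k + 1 by omega), List.take_succ_cons]

lemma pv_drop_shift (l t : List Char) (k : Nat) :
    (l ++ '\n' :: t).drop (l.length + 1 + k) = t.drop k := by
  rw [List.drop_append, List.drop_eq_nil_of_le (by omega),
    (show l.length + 1 + k - l.length = k + 1 by omega), List.drop_succ_cons, List.nil_append]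

lemma pv_find_step {M l rest : List Char} (hM : '\n' ∉ M) (hMl : ¬ M <:+: l)
    (hMr : M <:+: rest) :
    PySem.Chars.find (l ++ '\n' :: rest) M
      = (l.length : Int) + 1 + PySem.Chars.find rest M := by
  have hr0 : 0 ≤ PySem.Chars.find rest M := (PySem.Chars.find_nonneg_iff _ _).2 hMr
  obtain ⟨h1, h2⟩ := PySem.Chars.find_spec hr0
  have hmain : PySem.Chars.find (l ++ '\n' :: rest) M
      = ((l.length + 1 + (PySem.Chars.find rest M).toNat : Nat) : Int) := by
    apply pv_find_eq
    · rw [pv_drop_shift l rest _]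
      exact h1
    · intro i hi hpre
      by_cases hil : i ≤ l.length
      · rw [List.drop_append, (show i - l.length = 0 by omega), List.drop_zero] at hpre
        exact hMl ((pv_infix_iff_drop _ _).2 ⟨i, pv_prefix_through_sep hM hpre⟩)
      · rw [(show i = l.length + 1 + (i - l.length - 1) by omega), pv_drop_shift] at hpre
        exact h2 _ (by omega) hpre
  rw [hmain]
  push_cast
  omega

lemma pv_find_inside {M l rest : List Char} (hM : '\n' ∉ M) (hMl : M <:+: l) :
    PySem.Chars.find (l ++ '\n' :: rest) M = PySem.Chars.find l M := by
  have hl0 : 0 ≤ PySem.Chars.find l M := (PySem.Chars.find_nonneg_iff _ _).2 hMl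
  obtain ⟨h1, h2⟩ := PySem.Chars.find_spec hl0
  have hfle : (PySem.Chars.find l M).toNat ≤ l.length := by
    have := PySem.Chars.find_le_length l M
    omega
  have hmain : PySem.Chars.find (l ++ '\n' :: rest) M = ((PySem.Chars.find l M).toNat : Int) := by
    apply pv_find_eq
    · rw [List.drop_append, (show (PySem.Chars.find l M).toNat - l.length = 0 by omega),
        List.drop_zero]
      exact h1.trans (List.prefix_append _ _)
    · intro i hi hpre
      rw [List.drop_append, (show i - l.length = 0 by omega), List.drop_zero] at hpre
      exact h2 i hi (pv_prefix_through_sep hM hpre)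
  rw [hmain, Int.toNat_of_nonneg hl0]

-- ---- rfind characterization ----

lemma pv_single_not_prefix {s : List Char} (h : '\n' ∉ s) (j : Nat) :
    (['\n'] : List Char).isPrefixOf (s.drop j) = false := by
  cases hd : s.drop j with
  | nil => simp [List.isPrefixOf]
  | cons c t =>
    have hc : c ∈ s := List.mem_of_mem_drop (hd ▸ List.mem_cons_self)
    have hne : c ≠ '\n' := fun e => h (e ▸ hc)
    simp [List.isPrefixOf]
    exact fun e => (hne e.symm).elim

lemma pv_rfind_go_zero (s sub : List Char) :
    PySem.Chars.rfind.go s sub 0 = if sub.isPrefixOf s then (0 : Int) else -1 := by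
  simp only [PySem.Chars.rfind.go]

lemma pv_rfind_go_succ (s sub : List Char) (m : Nat) :
    PySem.Chars.rfind.go s sub (m + 1)
      = if sub.isPrefixOf (s.drop (m + 1)) then ((m + 1 : Nat) : Int)
        else PySem.Chars.rfind.go s sub m := by
  simp only [PySem.Chars.rfind.go]

lemma pv_rfind_go_ge (s sub : List Char) : ∀ j, -1 ≤ PySem.Chars.rfind.go s sub j := by
  intro j
  induction j with
  | zero =>
    simp only [PySem.Chars.rfind.go]
    split
    · omega
    · omega
  | succ j ih =>
    simp only [PySem.Chars.rfind.go]
    split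
    · omega
    · exact ih

lemma pv_rfind_ge (s sub : List Char) : -1 ≤ PySem.Chars.rfind s sub :=
  pv_rfind_go_ge s sub s.length

lemma pv_rfind_no_sep (s : List Char) (h : '\n' ∉ s) :
    PySem.Chars.rfind s ['\n'] = -1 := by
  have hgo : ∀ j, PySem.Chars.rfind.go s ['\n'] j = -1 := by
    intro j
    induction j with
    | zero =>
      have h0 := pv_single_not_prefix h 0
      rw [List.drop_zero] at h0
      simp [PySem.Chars.rfind.go, h0]
    | succ j ih =>
      have hj := pv_single_not_prefix h (j + 1)
      simp [PySem.Chars.rfind.go, hj, ih]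
  exact hgo s.length

lemma pv_rfind_go_mid (l t : List Char) :
    PySem.Chars.rfind.go (l ++ '\n' :: t) ['\n'] l.length = (l.length : Int) := by
  cases l with
  | nil => simp [PySem.Chars.rfind.go, List.isPrefixOf]
  | cons a l' =>
    have hdrop : ((a :: l') ++ '\n' :: t).drop (l'.length + 1) = '\n' :: t := by
      simp
    simp [PySem.Chars.rfind.go, List.isPrefixOf]

lemma pv_rfind_go_shift (l t : List Char) : ∀ j, j ≤ t.length →
    PySem.Chars.rfind.go (l ++ '\n' :: t) ['\n'] (l.length + j + 1)
      = (l.length : Int) + 1 + PySem.Chars.rfind.go t ['\n'] j := by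
  intro j
  induction j with
  | zero =>
    intro _
    have hdrop : (l ++ '\n' :: t).drop (l.length + 1) = t := by
      have := pv_drop_shift l t 0
      rw [Nat.add_zero] at this
      rw [this, List.drop_zero]
    rw [Nat.add_zero, pv_rfind_go_succ, hdrop, pv_rfind_go_zero, pv_rfind_go_mid]
    split_ifs with hp
    · push_cast; ring
    · ring
  | succ j ih =>
    intro hj
    rw [(show l.length + (j + 1) + 1 = (l.length + j + 1) + 1 by omega)]
    have hdrop : (l ++ '\n' :: t).drop ((l.length + j + 1) + 1) = t.drop (j + 1) := by
      rw [(show l.length + j + 1 + 1 = l.length + 1 + (j + 1) by omega)]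
      exact pv_drop_shift l t (j + 1)
    rw [pv_rfind_go_succ, hdrop, ih (by omega), pv_rfind_go_succ]
    split_ifs with hp
    · push_cast; ring
    · rfl

lemma pv_rfind_step (l t : List Char) :
    PySem.Chars.rfind (l ++ '\n' :: t) ['\n']
      = (l.length : Int) + 1 + PySem.Chars.rfind t ['\n'] := by
  unfold PySem.Chars.rfind
  rw [(show (l ++ '\n' :: t).length = l.length + t.length + 1 by simp only [List.length_append, List.length_cons]; omega)]
  exact pv_rfind_go_shift l t t.length le_rfl

lemma pv_rfindFrom_eq_rfind_take (s sub : List Char) {p : Int} (h0 : 0 ≤ p)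
    (hle : p ≤ (s.length : Int)) :
    PySem.Chars.rfindFrom s sub 0 (some p) = PySem.Chars.rfind (s.take p.toNat) sub := by
  have hnp : ¬ ((s.length : Int) < p) := by omega
  have hp0 : ¬ (p < 0) := by omega
  simp only [PySem.Chars.rfindFrom, hnp, if_false, hp0]
  norm_num
  by_cases hr : PySem.Chars.rfind (s.take p.toNat) sub = -1
  · simp [hr, hp0]
  · simp [hr, hp0]

-- ---- the main induction ----

lemma pv_core (cs : List Char)
    (IH : ∀ cs' : List Char, cs'.length < cs.length → pvAGo cs' = pvBGo cs') :
    pvAGo cs = pvBGo cs := by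
  by_cases hmem : '\n' ∈ cs
  · obtain ⟨l, rest, rfl, hl⟩ := pv_decomp cs hmem
    have hsplit := pv_splitOn_cons l rest hl
    by_cases hMl : pvMarkerA <:+: l
    · -- the marker occurs in the first line: both return "```" ++ cs ++ "\n```"
      have hisIn : PySem.Chars.isIn pvMarkerA l = true := (PySem.Chars.isIn_iff_infix _ _).2 hMl
      have hA : pvAGo (l ++ '\n' :: rest) = "```".toList ++ (l ++ '\n' :: rest) ++ "\n```".toList := by
        simp only [pvAGo, hsplit, pvFirstIdx, hisIn, if_true]
        rw [← hsplit]
        simp [PySem.Chars.join_singleton, pv_join_splitOn (l ++ '\n' :: rest).length _ le_rfl]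
      have hf0 : 0 ≤ PySem.Chars.find l pvMarkerA := (PySem.Chars.find_nonneg_iff _ _).2 hMl
      have hfl : PySem.Chars.find l pvMarkerA ≤ (l.length : Int) := PySem.Chars.find_le_length _ _
      have hfind := pv_find_inside (rest := rest) pv_nl_not_mem_marker hMl
      have hB : pvBGo (l ++ '\n' :: rest)
          = "```".toList ++ (l ++ '\n' :: rest) ++ "\n```".toList := by
        simp only [pvBGo, pv_marker_eq, hfind]
        rw [if_neg (by omega)]
        rw [pv_rfindFrom_eq_rfind_take _ _ hf0 (by simp; omega)]
        have htake : (l ++ '\n' :: rest).take (PySem.Chars.find l pvMarkerA).toNat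
            = l.take (PySem.Chars.find l pvMarkerA).toNat := by
          rw [List.take_append, (show (PySem.Chars.find l pvMarkerA).toNat - l.length = 0 by omega),
            List.take_zero, List.append_nil]
        rw [htake, pv_rfind_no_sep _ (fun hmm => hl (List.mem_of_mem_take hmm))]
        norm_num [pysem]
      rw [hA, hB]
    · have hisIn : PySem.Chars.isIn pvMarkerA l = false := (PySem.Chars.isIn_eq_false_iff _ _).2 hMl
      have hAstep : pvAGo (l ++ '\n' :: rest) = l ++ '\n' :: pvAGo rest := by
        simp only [pvAGo, hsplit, pvFirstIdx, hisIn, Bool.false_eq_true, if_false]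
        cases hidx : pvFirstIdx (PySem.Chars.splitOn rest ['\n']) with
        | none => simp
        | some i' =>
          simp only [Option.map_some, List.take_succ_cons, List.drop_succ_cons]
          rw [List.cons_append, pv_join_cons ['\n'] l
            (List.take i' (PySem.Chars.splitOn rest ['\n']) ++
              ["```".toList ++ PySem.Chars.join ['\n']
                (List.drop i' (PySem.Chars.splitOn rest ['\n'])) ++ "\n```".toList])
            (by simp)]
          simp
      have hBstep : pvBGo (l ++ '\n' :: rest) = l ++ '\n' :: pvBGo rest := by
        by_cases hMr : pvMarkerA <:+: rest
        · have hp0 : 0 ≤ PySem.Chars.find rest pvMarkerA :=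
            (PySem.Chars.find_nonneg_iff _ _).2 hMr
          have hlenr : PySem.Chars.find rest pvMarkerA ≤ (rest.length : Int) :=
            PySem.Chars.find_le_length _ _
          have hfcs := pv_find_step (rest := rest) pv_nl_not_mem_marker hMl hMr
          simp only [pvBGo, pv_marker_eq, hfcs]
          rw [if_neg (by omega), if_neg (by omega)]
          rw [pv_rfindFrom_eq_rfind_take _ _ (by omega) (by simp; omega)]
          rw [(show ((l.length : Int) + 1 + PySem.Chars.find rest pvMarkerA).toNat
            = l.length + 1 + (PySem.Chars.find rest pvMarkerA).toNat by omega)]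
          rw [pv_take_shift l rest _]
          rw [pv_rfind_step l _]
          rw [pv_rfindFrom_eq_rfind_take rest _ hp0 hlenr]
          have hr'ge : -1 ≤ PySem.Chars.rfind
              (rest.take (PySem.Chars.find rest pvMarkerA).toNat) ['\n'] := pv_rfind_ge _ _
          rw [PySem.Chars.slice_eq_listSlice, PySem.Chars.slice_eq_listSlice,
            PySem.Chars.slice_eq_listSlice, PySem.Chars.slice_eq_listSlice,
            PySem.List.slice_to _ (by omega), PySem.List.slice_from _ (by omega),
            PySem.List.slice_to _ (by omega), PySem.List.slice_from _ (by omega)]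
          rw [(show ((l.length : Int) + 1 +
              PySem.Chars.rfind (rest.take (PySem.Chars.find rest pvMarkerA).toNat) ['\n'] + 1).toNat
            = l.length + 1 + (PySem.Chars.rfind
              (rest.take (PySem.Chars.find rest pvMarkerA).toNat) ['\n'] + 1).toNat by omega)]
          rw [pv_take_shift, pv_drop_shift]
          simp
        · have hnot : ¬ pvMarkerA <:+: (l ++ '\n' :: rest) := fun h =>
            (pv_infix_split pv_nl_not_mem_marker h).elim hMl hMr
          simp only [pvBGo, pv_marker_eq, (PySem.Chars.find_eq_neg_one_iff _ _).2 hnot,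
            (PySem.Chars.find_eq_neg_one_iff _ _).2 hMr]
          simp
      rw [hAstep, hBstep, IH rest (by simp; omega)]
  · by_cases hM : pvMarkerA <:+: cs
    · have hisIn : PySem.Chars.isIn pvMarkerA cs = true := (PySem.Chars.isIn_iff_infix _ _).2 hM
      have hf0 : 0 ≤ PySem.Chars.find cs pvMarkerA := (PySem.Chars.find_nonneg_iff _ _).2 hM
      have hA : pvAGo cs = "```".toList ++ cs ++ "\n```".toList := by
        simp only [pvAGo, pv_splitOn_no_sep cs hmem, pvFirstIdx, hisIn, if_true]
        simp [PySem.Chars.join_singleton]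
      have hB : pvBGo cs = "```".toList ++ cs ++ "\n```".toList := by
        simp only [pvBGo, pv_marker_eq]
        rw [if_neg (by omega)]
        rw [pv_rfindFrom_eq_rfind_take _ _ hf0 (PySem.Chars.find_le_length _ _)]
        rw [pv_rfind_no_sep _ (fun hmm => hmem (List.mem_of_mem_take hmm))]
        norm_num [pysem]
      rw [hA, hB]
    · have hisIn : PySem.Chars.isIn pvMarkerA cs = false := (PySem.Chars.isIn_eq_false_iff _ _).2 hM
      have hfind : PySem.Chars.find cs pvMarkerA = -1 := (PySem.Chars.find_eq_neg_one_iff _ _).2 hM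
      simp only [pvAGo, pv_splitOn_no_sep cs hmem, pvFirstIdx, hisIn, Bool.false_eq_true, if_false,
        pvBGo, pv_marker_eq, hfind]
      simp

lemma pv_main (cs : List Char) : pvAGo cs = pvBGo cs := by
  suffices h : ∀ (n : Nat) (cs : List Char), cs.length = n → pvAGo cs = pvBGo cs from
    h cs.length cs rfl
  intro n
  induction n using Nat.strong_induction_on with
  | _ n ih =>
    intro cs hlen
    subst hlen
    exact pv_core cs (fun cs' h' => ih _ h' cs' rfl)

-- ===== VERDICT (by name: the statement is the Claim_ definition above) =====
theorem format_message_to_codeblock_spec : Claim_equal_format_message_to_codeblock := by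
  intro message _
  unfold Spec_format_message_to_codeblock format_message_to_codeblock format_message_to_codeblock_alt
  exact congrArg String.ofList (pv_main message.toList)
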